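-- pv_equiv track=rewrite | github.com/Kyle-Youn/Today_I_Learned | Problem solving/프로그래머스 '귤 고르기'.py | solution
-- ===== SOURCE A (Python) =====
-- def solution(k, tangerine):
--     # 귤 사이즈별 갯수 카운트 - 딕셔너리 이용
--     tang_dict = {}
--     for tang in tangerine:
--         if tang not in tang_dict:
--             tang_dict[tang] = 1
--         else:
--             tang_dict[tang] += 1
--
--     # 귤 (사이즈, 갯수)를 담은 리스트를 갯수의 내림차순으로 정렬
--     tang_list = sorted(list(tang_dict.items()), key = lambda x:x[1], reverse = True)
--
--     # 한 박스 k개의 귤을 담기 위해서 몇 종류의 귤 사이즈가 들어가야하는지 최솟값을 카운트 후 리턴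
--     answer = 0
--     sum_num = 0
--     for _, num in tang_list:
--         sum_num += num
--         answer += 1
--         if sum_num >= k:
--             break
--         if sum_num < k:
--             continue
--     return answer
-- ===== SOURCE B (Python) =====
-- def solution(k, tangerine):
--     # Count occurrences per size, then counting-sort the frequencies into buckets
--     # and walk buckets from the highest frequency down, returning early.
--     counts = {}
--     for t in tangerine:
--         counts[t] = counts.get(t, 0) + 1
--     if not counts:
--         return 0
--     maxf = max(counts.values())
--     bucket = [0] * (maxf + 1)
--     for c in counts.values():
--         bucket[c] += 1
--     answer = 0
--     total = 0
--     for f in range(maxf, 0, -1):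
--         for _ in range(bucket[f]):
--             total += f
--             answer += 1
--             if total >= k:
--                 return answer
--     return answer
-- ===== Notes on version B (the rewrite author's own statement) =====
-- stated objective: alternative
-- what changed: Replaces A's comparison sort of (size, count) pairs by a counting sort: frequencies are tallied into buckets indexed by frequency, which are walked from the maximum frequency down with an early return once the running sum reaches k.
import Mathlib
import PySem

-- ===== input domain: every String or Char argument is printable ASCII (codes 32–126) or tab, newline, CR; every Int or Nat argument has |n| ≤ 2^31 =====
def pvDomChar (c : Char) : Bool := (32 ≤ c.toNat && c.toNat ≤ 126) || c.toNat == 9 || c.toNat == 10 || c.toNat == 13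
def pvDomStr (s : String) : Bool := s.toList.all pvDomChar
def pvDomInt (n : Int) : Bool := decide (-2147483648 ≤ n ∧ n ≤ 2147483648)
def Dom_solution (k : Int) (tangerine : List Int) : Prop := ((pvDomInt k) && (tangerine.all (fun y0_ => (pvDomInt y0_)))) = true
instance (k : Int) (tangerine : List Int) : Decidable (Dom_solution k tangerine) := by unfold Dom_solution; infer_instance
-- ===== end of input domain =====

-- B replaces A's comparison sort of (size, count) pairs by a counting sort of the
-- frequencies into buckets walked from the highest frequency down (objective: alternative).

-- ===== PORT A =====
def solution (k : Int) (tangerine : List Int) : Int :=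
  -- tang_dict: count per size
  let tang_dict : PySem.Dict Int Int :=
    tangerine.foldl (fun d tang =>
      if d.contains tang = false then d.insert tang 1 else d.modify tang 0 (· + 1))
      PySem.Dict.empty
  -- sorted by count, descending
  let tang_list := PySem.List.sorted tang_dict.items (fun x => x.2) true
  -- loop with break emulated by a done flag (the trailing `continue` is a no-op)
  let r := tang_list.foldl (fun (st : Int × Int × Bool) p =>
      if st.2.2 = true then st
      else
        let sum_num := st.2.1 + p.2
        let answer := st.1 + 1
        if sum_num ≥ k then (answer, sum_num, true) else (answer, sum_num, false))
    (0, 0, false)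
  r.1

-- ===== PORT B =====
-- inner `for _ in range(bucket[f])` with the early `return answer`
def solAltInner (k f : Int) : Nat → Int → Int → (Int × Int) ⊕ Int
  | 0, answer, total => Sum.inl (answer, total)
  | n+1, answer, total =>
    let total' := total + f
    let answer' := answer + 1
    if total' ≥ k then Sum.inr answer' else solAltInner k f n answer' total'

-- outer `for f in range(maxf, 0, -1)` as a countdown on f
def solAltOuter (k : Int) (bucket : List Int) : Nat → Int → Int → Int
  | 0, answer, _ => answer
  | f+1, answer, total =>
    match solAltInner k ((f : Int) + 1) (PySem.List.pyGetD bucket ((f : Int) + 1) 0).toNat answer total with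
    | Sum.inr r => r
    | Sum.inl (answer', total') => solAltOuter k bucket f answer' total'

def solution_alt (k : Int) (tangerine : List Int) : Int :=
  let counts : PySem.Dict Int Int :=
    tangerine.foldl (fun d t => d.insert t (d.getD t 0 + 1)) PySem.Dict.empty
  if counts.items = [] then 0
  else
    match PySem.List.max? counts.values (fun y => y) with
    | none => 0  -- unreachable: counts is nonempty
    | some maxf =>
      let bucket := counts.values.foldl
        (fun b c => PySem.List.pySetD b c (PySem.List.pyGetD b c 0 + 1))
        (List.replicate (maxf.toNat + 1) (0 : Int))
      solAltOuter k bucket maxf.toNat 0 0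

-- ===== PRECONDITION & SPEC =====
def Spec_solution (k : Int) (tangerine : List Int) (out : Int) : Prop := out = solution_alt k tangerine
instance (k : Int) (tangerine : List Int) (out : Int) : Decidable (Spec_solution k tangerine out) := by unfold Spec_solution; infer_instance

-- ===== CLAIM (what is proved, stated in full; the proofs are below) =====
def Claim_equal_solution : Prop := ∀ (k : Int) (tangerine : List Int), Dom_solution k tangerine → Spec_solution k tangerine (solution k tangerine)

-- ===== LEMMAS AND PROOFS =====

-- Both loops, abstracted: walk a list of counts, add one at a time, stop at ≥ k.
def scanC (k : Int) : Int → Int → List Int → Int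
  | answer, _, [] => answer
  | answer, sum, c :: rest =>
    if sum + c ≥ k then answer + 1 else scanC k (answer + 1) (sum + c) rest

-- the list of counts B walks: for f = fn, fn-1, …, 1, (g f) copies of f
def descList (g : Nat → Nat) : Nat → List Int
  | 0 => []
  | f+1 => List.replicate (g (f+1)) ((f : Int) + 1) ++ descList g f

-- ---- A side ----

lemma dictA_eq_counter (xs : List Int) :
    xs.foldl (fun d tang =>
      if d.contains tang = false then d.insert tang 1 else d.modify tang 0 (· + 1))
      PySem.Dict.empty = PySem.Dict.counter xs := by
  rw [PySem.Dict.counter_eq_foldl]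
  suffices h : ∀ (l : List Int) (d : PySem.Dict Int Int),
      l.foldl (fun d tang =>
        if d.contains tang = false then d.insert tang 1 else d.modify tang 0 (· + 1)) d
        = l.foldl (fun d x => d.modify x 0 (· + 1)) d from h xs _
  intro l
  induction l with
  | nil => intro d; rfl
  | cons t l ih =>
    intro d
    simp only [List.foldl_cons]
    rw [ih]
    congr 1
    rcases hc : d.contains t with hfalse | htrue
    · simp [PySem.Dict.modify, hc, PySem.Dict.getD_of_not_contains]
    · simp

lemma foldl_done (k : Int) (l : List (Int × Int)) (a s : Int) :
    l.foldl (fun (st : Int × Int × Bool) p =>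
      if st.2.2 = true then st
      else
        let sum_num := st.2.1 + p.2
        let answer := st.1 + 1
        if sum_num ≥ k then (answer, sum_num, true) else (answer, sum_num, false))
      (a, s, true) = (a, s, true) := by
  induction l with
  | nil => rfl
  | cons p l ih => simpa using ih

lemma foldl_scan (k : Int) (l : List (Int × Int)) : ∀ a s : Int,
    (l.foldl (fun (st : Int × Int × Bool) p =>
      if st.2.2 = true then st
      else
        let sum_num := st.2.1 + p.2
        let answer := st.1 + 1
        if sum_num ≥ k then (answer, sum_num, true) else (answer, sum_num, false))
      (a, s, false)).1 = scanC k a s (l.map (·.2)) := by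
  induction l with
  | nil => intro a s; rfl
  | cons p l ih =>
    intro a s
    simp only [List.foldl_cons, List.map_cons]
    by_cases h : s + p.2 ≥ k
    · simp [scanC, h, foldl_done]
    · simp [scanC, h, ih]

-- ---- B side ----

lemma innerScan (k f : Int) : ∀ (n : Nat) (answer total : Int) (rest : List Int),
    (match solAltInner k f n answer total with
     | Sum.inr r => r
     | Sum.inl (a, t) => scanC k a t rest)
      = scanC k answer total (List.replicate n f ++ rest) := by
  intro n
  induction n with
  | zero => intro a t rest; rfl
  | succ n ih =>
    intro a t rest
    simp only [solAltInner, List.replicate_succ, List.cons_append, scanC]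
    by_cases h : t + f ≥ k
    · simp [h]
    · simp only [if_neg h]
      exact ih _ _ _

lemma outerScan (k : Int) (bucket : List Int) : ∀ (fn : Nat) (answer total : Int),
    solAltOuter k bucket fn answer total
      = scanC k answer total
          (descList (fun j => (PySem.List.pyGetD bucket (j : Int) 0).toNat) fn) := by
  intro fn
  induction fn with
  | zero => intro a t; rfl
  | succ f ih =>
    intro a t
    simp only [solAltOuter, descList]
    rw [show ((f : Nat) + 1 : Nat) = ((f + 1 : Nat) : Nat) from rfl]
    have hcast : ((f : Int) + 1) = ((f + 1 : Nat) : Int) := by omega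
    rw [hcast]
    rw [← innerScan k _ _ a t _]
    rcases hres : solAltInner k ((f + 1 : Nat) : Int)
        (PySem.List.pyGetD bucket ((f + 1 : Nat) : Int) 0).toNat a t with ⟨a', t'⟩ | r
    · exact ih _ _
    · rfl

-- ---- bucket filling ----

lemma fill_length (vs : List Int) : ∀ b : List Int,
    (vs.foldl (fun b c => PySem.List.pySetD b c (PySem.List.pyGetD b c 0 + 1)) b).length
      = b.length := by
  induction vs with
  | nil => intro b; rfl
  | cons v vs ih =>
    intro b
    simp only [List.foldl_cons, ih, PySem.List.length_pySetD]

lemma fill_getD (vs : List Int) : ∀ b : List Int,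
    (∀ v ∈ vs, 0 ≤ v ∧ v.toNat < b.length) → ∀ j : Nat,
    (vs.foldl (fun b c => PySem.List.pySetD b c (PySem.List.pyGetD b c 0 + 1)) b).getD j 0
      = b.getD j 0 + (vs.count (j : Int) : Int) := by
  induction vs with
  | nil => intro b _ j; simp
  | cons v vs ih =>
    intro b hb j
    obtain ⟨hv0, hvlen⟩ := hb v (by simp)
    simp only [List.foldl_cons]
    have hset : PySem.List.pySetD b v (PySem.List.pyGetD b v 0 + 1)
        = b.set v.toNat (b.getD v.toNat 0 + 1) := by
      rw [PySem.List.pySetD_of_nonneg _ _ hv0,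
        PySem.List.pyGetD_eq_getElem _ _ hv0 (by omega)]
      congr 1
      rw [List.getD_eq_getElem _ _ hvlen]
    rw [hset, ih _ (by
      intro w hw
      obtain ⟨h1, h2⟩ := hb w (by simp [hw])
      exact ⟨h1, by simpa using h2⟩) j]
    have hcount : (v :: vs).count (j : Int) = vs.count (j : Int) + (if v = (j : Int) then 1 else 0) := by
      simp [List.count_cons]
    rw [hcount]
    by_cases hj : j = v.toNat
    · subst hj
      have hv : v = ((v.toNat : Nat) : Int) := by omega
      have hset2 : (b.set v.toNat (b.getD v.toNat 0 + 1)).getD v.toNat 0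
          = b.getD v.toNat 0 + 1 := by
        rw [List.getD_eq_getElem _ _ (by simpa using hvlen)]
        exact List.getElem_set_self (by simpa using hvlen)
      rw [hset2, if_pos hv]
      push_cast
      ring
    · have : (b.set v.toNat (b.getD v.toNat 0 + 1)).getD j 0 = b.getD j 0 := by
        by_cases hlt : j < b.length
        · rw [List.getD_eq_getElem _ _ (by simpa using hlt),
            List.getElem_set_ne (by omega), List.getD_eq_getElem _ _ hlt]
        · rw [List.getD_eq_default _ _ (by simpa using (by omega : ¬ j < b.length)),
            List.getD_eq_default _ _ (by omega)]
      rw [this, if_neg (by omega)]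
      omega

-- ---- descList facts ----

lemma mem_descList (g : Nat → Nat) : ∀ (fn : Nat) (x : Int),
    x ∈ descList g fn → 1 ≤ x ∧ x ≤ (fn : Int) := by
  intro fn
  induction fn with
  | zero => intro x hx; simp [descList] at hx
  | succ f ih =>
    intro x hx
    simp only [descList, List.mem_append, List.mem_replicate] at hx
    rcases hx with ⟨-, rfl⟩ | hx
    · refine ⟨by omega, by push_cast; omega⟩
    · obtain ⟨h1, h2⟩ := ih x hx
      exact ⟨h1, by push_cast; omega⟩

lemma pairwise_descList (g : Nat → Nat) : ∀ fn : Nat,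
    (descList g fn).Pairwise (· ≥ ·) := by
  intro fn
  induction fn with
  | zero => simp [descList]
  | succ f ih =>
    simp only [descList]
    rw [List.pairwise_append]
    refine ⟨List.pairwise_replicate.2 (by simp), ih, ?_⟩
    intro a ha b hb
    rw [List.mem_replicate] at ha
    obtain ⟨-, rfl⟩ := ha
    have := (mem_descList g f b hb).2
    omega

lemma count_descList (g : Nat → Nat) : ∀ (fn : Nat) (x : Int),
    (descList g fn).count x = if 1 ≤ x ∧ x ≤ (fn : Int) then g x.toNat else 0 := by
  intro fn
  induction fn with
  | zero => intro x; simp only [descList, List.count_nil]; rw [if_neg (by omega)]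
  | succ f ih =>
    intro x
    simp only [descList, List.count_append, List.count_replicate, beq_iff_eq, ih]
    by_cases hx : x = ((f : Int) + 1)
    · subst hx
      rw [if_pos rfl, if_neg (by omega), if_pos (by constructor <;> omega)]
      have h2 : ((f : Int) + 1).toNat = f + 1 := by omega
      rw [h2]
      omega
    · rw [if_neg (fun h => hx h.symm)]
      by_cases h1 : 1 ≤ x ∧ x ≤ (f : Int)
      · rw [if_pos h1, if_pos (by constructor <;> omega)]
        omega
      · rw [if_neg h1, if_neg (by rw [Nat.cast_add, Nat.cast_one]; omega)]

-- ---- counter values facts ----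

lemma values_counter (xs : List Int) :
    (PySem.Dict.counter xs).values = (PySem.Set.ofList xs).map (fun k => (xs.count k : Int)) := by
  simp only [PySem.Dict.values, PySem.Dict.items_counter, List.map_map]
  rfl

lemma one_le_of_mem_values_counter (xs : List Int) (v : Int)
    (hv : v ∈ (PySem.Dict.counter xs).values) : 1 ≤ v := by
  rw [values_counter] at hv
  obtain ⟨x, hx, rfl⟩ := List.mem_map.1 hv
  have : x ∈ xs := (PySem.Set.mem_ofList _ _).1 hx
  have : 0 < xs.count x := List.count_pos_iff.2 this
  omega

-- ===== MAIN PROOF =====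

lemma solution_eq_scan (k : Int) (xs : List Int) :
    solution k xs
      = scanC k 0 0 ((PySem.List.sorted (PySem.Dict.counter xs).items (fun x => x.2) true).map (·.2)) := by
  unfold solution
  rw [dictA_eq_counter]
  exact foldl_scan k _ 0 0

lemma solution_alt_eq (k : Int) (xs : List Int) (hxs : xs ≠ []) :
    ∃ maxf : Int,
      PySem.List.max? (PySem.Dict.counter xs).values (fun y => y) = some maxf ∧
      solution_alt k xs
        = scanC k 0 0
            (descList (fun j =>
              (PySem.List.pyGetD
                ((PySem.Dict.counter xs).values.foldl
                  (fun b c => PySem.List.pySetD b c (PySem.List.pyGetD b c 0 + 1))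
                  (List.replicate (maxf.toNat + 1) (0 : Int)))
                (j : Int) 0).toNat) maxf.toNat) := by
  have hfold : xs.foldl (fun d t => d.insert t (d.getD t 0 + 1)) PySem.Dict.empty
      = PySem.Dict.counter xs := PySem.Dict.foldl_insert_getD_add_one_eq_counter xs
  have hitems : (PySem.Dict.counter xs).items ≠ [] := by
    rw [PySem.Dict.items_counter]
    obtain ⟨x, xs', rfl⟩ := List.exists_cons_of_ne_nil hxs
    intro h
    have : x ∈ PySem.Set.ofList (x :: xs') := (PySem.Set.mem_ofList _ _).2 (by simp)
    rw [List.map_eq_nil_iff.1 h] at this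
    simp at this
  have hvals : (PySem.Dict.counter xs).values ≠ [] := by
    simp only [PySem.Dict.values]
    exact fun h => hitems (List.map_eq_nil_iff.1 h)
  obtain ⟨maxf, hmax⟩ : ∃ m, PySem.List.max? (PySem.Dict.counter xs).values (fun y => y) = some m := by
    rcases h : PySem.List.max? (PySem.Dict.counter xs).values (fun y => y) with - | m
    · exact absurd ((PySem.List.max?_eq_none_iff _ _).1 h) hvals
    · exact ⟨m, rfl⟩
  refine ⟨maxf, hmax, ?_⟩
  unfold solution_alt
  simp only [hfold, hmax, if_neg hitems]
  exact outerScan k _ maxf.toNat 0 0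

lemma counts_lists_eq (xs : List Int) (maxf : Int)
    (hmax : PySem.List.max? (PySem.Dict.counter xs).values (fun y => y) = some maxf) :
    ((PySem.List.sorted (PySem.Dict.counter xs).items (fun x => x.2) true).map (·.2))
      = descList (fun j =>
          (PySem.List.pyGetD
            ((PySem.Dict.counter xs).values.foldl
              (fun b c => PySem.List.pySetD b c (PySem.List.pyGetD b c 0 + 1))
              (List.replicate (maxf.toNat + 1) (0 : Int)))
            (j : Int) 0).toNat) maxf.toNat := by
  set vs := (PySem.Dict.counter xs).values with hvs
  have hmem : ∀ v ∈ vs, 1 ≤ v ∧ v ≤ maxf := by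
    intro v hv
    exact ⟨one_le_of_mem_values_counter xs v hv, PySem.List.max?_isMax hmax v hv⟩
  have hmaxf1 : 1 ≤ maxf := by
    have hm := PySem.List.max?_mem hmax
    exact (hmem maxf hm).1
  set bucket := vs.foldl (fun b c => PySem.List.pySetD b c (PySem.List.pyGetD b c 0 + 1))
      (List.replicate (maxf.toNat + 1) (0 : Int)) with hbucket
  have hblen : bucket.length = maxf.toNat + 1 := by
    rw [hbucket, fill_length]; simp
  have hgetD : ∀ j : Nat, bucket.getD j 0 = (vs.count (j : Int) : Int) := by
    intro j
    rw [hbucket, fill_getD _ _ (by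
      intro v hv
      obtain ⟨h1, h2⟩ := hmem v hv
      refine ⟨by omega, ?_⟩
      simp only [List.length_replicate]
      omega) j]
    simp [List.getD_eq_getElem?_getD]
  set g := fun j : Nat => (PySem.List.pyGetD bucket (j : Int) 0).toNat with hg
  have hgj : ∀ j : Nat, g j = vs.count ((j : Nat) : Int) := by
    intro j
    rw [hg]
    simp only [PySem.List.pyGetD_natCast, hgetD j]
    omega
  -- the two lists are permutations of each other and both sorted descending
  have hpermA : ((PySem.List.sorted (PySem.Dict.counter xs).items (fun x => x.2) true).map (·.2)).Perm vs := by
    rw [hvs]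
    simp only [PySem.Dict.values]
    exact List.Perm.map (fun p : Int × Int => p.2) (PySem.List.sorted_perm _ _ _)
  have hpermB : (descList g maxf.toNat).Perm vs := by
    rw [List.perm_iff_count]
    intro x
    rw [count_descList]
    by_cases hx : 1 ≤ x ∧ x ≤ ((maxf.toNat : Nat) : Int)
    · rw [if_pos hx, hgj x.toNat]
      have : ((x.toNat : Nat) : Int) = x := by omega
      rw [this]
    · rw [if_neg hx]
      symm
      rw [List.count_eq_zero]
      intro hmem'
      obtain ⟨h1, h2⟩ := hmem x hmem'
      push_cast at hx
      omega
  have hpA : ((PySem.List.sorted (PySem.Dict.counter xs).items (fun x => x.2) true).map (·.2)).Pairwise (· ≥ ·) := by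
    rw [List.pairwise_map]
    exact PySem.List.sorted_pairwise_rev _ _
  have hpB : (descList g maxf.toNat).Pairwise (· ≥ ·) := pairwise_descList g maxf.toNat
  exact (hpermA.trans hpermB.symm).eq_of_pairwise
    (fun _ _ _ _ hab hba => le_antisymm hba hab) hpA hpB

-- ===== VERDICT (by name: the statement is the Claim_ definition above) =====
theorem solution_spec : Claim_equal_solution := by
  intro k tangerine _
  unfold Spec_solution
  by_cases hxs : tangerine = []
  · subst hxs; rfl
  · obtain ⟨maxf, hmax, hB⟩ := solution_alt_eq k tangerine hxs
    rw [hB, solution_eq_scan, counts_lists_eq tangerine maxf hmax]
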